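-- pv_equiv track=rewrite | github.com/ni/nimi-python | build/helper/documentation_helper.py | _remove_trailing_whitespace
-- ===== SOURCE A (Python) =====
-- def _remove_trailing_whitespace(s):
--     '''Removes trailing whitespace and empty lines in multi-line strings.'''
--     initial_lines = s.strip().splitlines()
--     fixed_lines = []
--     blank_lines = 0
--     for l in initial_lines:
--         stripped_line = l.strip()
--         if len(stripped_line) == 0 and blank_lines == 0:
--             fixed_lines.append(stripped_line)
--             blank_lines = 1
--         if len(stripped_line) > 0:
--             fixed_lines.append(stripped_line)
--             blank_lines = 0
--
--     return fixed_lines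
-- ===== SOURCE B (Python) =====
-- def _remove_trailing_whitespace(s):
--     '''Removes trailing whitespace and empty lines in multi-line strings.'''
--     lines = [l.strip() for l in s.strip().splitlines()]
--     groups = []
--     for x in lines:
--         k = (x == '')
--         if groups and groups[-1][0] == k:
--             groups[-1][1].append(x)
--         else:
--             groups.append([k, [x]])
--     out = []
--     for k, g in groups:
--         if k:
--             out.append('')
--         else:
--             out.extend(g)
--     return out
-- ===== Notes on version B (the rewrite author's own statement) =====
-- stated objective: alternative
-- what changed: Replaces the stateful blank-line-counter loop with run-length grouping: build runs of consecutive blank/non-blank stripped lines, then emit a single empty entry per blank run and all lines of each non-blank run.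
import Mathlib
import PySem

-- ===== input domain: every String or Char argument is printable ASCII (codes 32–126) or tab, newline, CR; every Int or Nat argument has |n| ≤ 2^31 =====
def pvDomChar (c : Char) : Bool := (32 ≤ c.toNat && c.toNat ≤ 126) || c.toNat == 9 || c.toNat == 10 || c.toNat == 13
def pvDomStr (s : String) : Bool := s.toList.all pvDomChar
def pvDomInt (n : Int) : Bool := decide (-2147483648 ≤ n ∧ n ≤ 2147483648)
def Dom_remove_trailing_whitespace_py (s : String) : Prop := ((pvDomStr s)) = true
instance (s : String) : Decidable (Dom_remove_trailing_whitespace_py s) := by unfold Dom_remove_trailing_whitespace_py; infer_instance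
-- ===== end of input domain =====

-- B replaces A's stateful blank-line counter with run-length grouping of the stripped lines (alternative decomposition; return value only).

-- ===== PORT A =====
-- loop body of A's 'for l in initial_lines' (state = (fixed_lines, blank_lines))
def pvStepA (st : List String × Int) (l : String) : List String × Int :=
  let stripped_line := PySem.Str.strip l
  let st := if PySem.Str.len stripped_line == 0 && st.2 == 0 then (st.1 ++ [stripped_line], (1 : Int)) else st
  let st := if 0 < PySem.Str.len stripped_line then (st.1 ++ [stripped_line], (0 : Int)) else st
  st

def remove_trailing_whitespace_py (s : String) : List String :=
  let initial_lines := PySem.Str.splitlines (PySem.Str.strip s)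
  (initial_lines.foldl pvStepA ([], 0)).1

-- ===== PORT B =====
-- grouping loop body: append x to the last run if its blankness matches, else start a new run
def pvStepB (gs : List (Bool × List String)) (x : String) : List (Bool × List String) :=
  let k := x == ""
  match gs.getLast? with
  | some last => if last.1 == k then gs.dropLast ++ [(last.1, last.2 ++ [x])] else gs ++ [(k, [x])]
  | none => gs ++ [(k, [x])]

-- emission loop body: a single empty entry per blank run, all lines of a non-blank run
def pvEmitB (out : List String) (kg : Bool × List String) : List String :=
  if kg.1 then out ++ [""] else out ++ kg.2

def remove_trailing_whitespace_py_alt (s : String) : List String :=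
  let lines := (PySem.Str.splitlines (PySem.Str.strip s)).map PySem.Str.strip
  let groups := lines.foldl pvStepB []
  groups.foldl pvEmitB []

-- ===== PRECONDITION & SPEC =====
def Spec_remove_trailing_whitespace_py (s : String) (out : List String) : Prop := out = remove_trailing_whitespace_py_alt s
instance (s : String) (out : List String) : Decidable (Spec_remove_trailing_whitespace_py s out) := by unfold Spec_remove_trailing_whitespace_py; infer_instance

-- ===== CLAIM (what is proved, stated in full; the proofs are below) =====
def Claim_equal_remove_trailing_whitespace_py : Prop := ∀ (s : String), Dom_remove_trailing_whitespace_py s → Spec_remove_trailing_whitespace_py s (remove_trailing_whitespace_py s)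

-- ===== LEMMAS AND PROOFS =====

-- what B's emission loop produces from a group list
def pvOut : List (Bool × List String) → List String
  | [] => []
  | (k, g) :: gs => (if k then [""] else g) ++ pvOut gs

theorem pvOut_append (a b : List (Bool × List String)) : pvOut (a ++ b) = pvOut a ++ pvOut b := by
  induction a with
  | nil => simp [pvOut]
  | cons h t ih => cases h; simp only [List.cons_append, pvOut, ih, List.append_assoc]

theorem pvOut_concat (gs : List (Bool × List String)) (kg : Bool × List String) :
    pvOut (gs ++ [kg]) = pvOut gs ++ (if kg.1 then [""] else kg.2) := by
  rw [pvOut_append]; cases kg; simp [pvOut]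

theorem foldl_pvEmitB (gs : List (Bool × List String)) (out : List String) :
    gs.foldl pvEmitB out = out ++ pvOut gs := by
  induction gs generalizing out with
  | nil => simp [pvOut]
  | cons kg t ih =>
    obtain ⟨k, g⟩ := kg
    have hout : pvOut ((k, g) :: t) = (if k then [""] else g) ++ pvOut t := rfl
    rw [List.foldl_cons, ih, hout]
    unfold pvEmitB
    by_cases hk : k = true <;> simp [hk]

-- blankness of the last group
def pvLastBlank (gs : List (Bool × List String)) : Bool :=
  match gs.getLast? with
  | some kg => kg.1
  | none => false

theorem pvLastBlank_concat (gs : List (Bool × List String)) (kg : Bool × List String) :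
    pvLastBlank (gs ++ [kg]) = kg.1 := by
  unfold pvLastBlank; rw [List.getLast?_concat]

theorem pvOut_last (gs : List (Bool × List String)) (kg : Bool × List String)
    (hgl : gs.getLast? = some kg) :
    pvOut gs = pvOut gs.dropLast ++ (if kg.1 then [""] else kg.2) := by
  have hne : gs ≠ [] := by intro h; subst h; simp at hgl
  have h2 : gs.getLast hne = kg := by
    rw [List.getLast?_eq_some_getLast hne] at hgl
    exact Option.some_inj.mp hgl
  conv_lhs => rw [← List.dropLast_concat_getLast hne]
  rw [h2, pvOut_concat]

-- A's loop body, by the three cases it distinguishes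
theorem pvStepA_blank_zero (acc : List String) (b : Int) (l : String)
    (hk : PySem.Str.strip l = "") (hb : b = 0) : pvStepA (acc, b) l = (acc ++ [""], 1) := by
  unfold pvStepA; rw [hk]; subst hb; simp [PySem.Str.len_eq]

theorem pvStepA_blank_pos (acc : List String) (b : Int) (l : String)
    (hk : PySem.Str.strip l = "") (hb : b ≠ 0) : pvStepA (acc, b) l = (acc, b) := by
  unfold pvStepA; rw [hk]; simp [PySem.Str.len_eq, hb]

theorem pvStepA_nonblank (acc : List String) (b : Int) (l : String)
    (hk : PySem.Str.strip l ≠ "") : pvStepA (acc, b) l = (acc ++ [PySem.Str.strip l], 0) := by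
  unfold pvStepA
  have hlen : (PySem.Str.strip l).length ≠ 0 := fun h => hk (String.length_eq_zero_iff.mp h)
  have h3 : (PySem.Chars.strip l.toList).length ≠ 0 := by
    rw [← PySem.Str.toList_strip]
    exact hlen
  have h5 : ¬(PySem.Chars.strip l.toList = []) := fun h => h3 (by simp [h])
  have h6 : 0 < (PySem.Chars.strip l.toList).length := Nat.pos_of_ne_zero h3
  simp [h5, h6]

-- B's grouping body, by the three cases it distinguishes
theorem pvStepB_new_empty (x : String) : pvStepB [] x = [(x == "", [x])] := by
  unfold pvStepB; simp

theorem pvStepB_match (gs : List (Bool × List String)) (x : String) (kg : Bool × List String)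
    (hgl : gs.getLast? = some kg) (h : kg.1 = (x == "")) :
    pvStepB gs x = gs.dropLast ++ [(kg.1, kg.2 ++ [x])] := by
  unfold pvStepB; rw [hgl]; simp [h]

theorem pvStepB_mismatch (gs : List (Bool × List String)) (x : String) (kg : Bool × List String)
    (hgl : gs.getLast? = some kg) (h : kg.1 ≠ (x == "")) :
    pvStepB gs x = gs ++ [(x == "", [x])] := by
  unfold pvStepB; rw [hgl]; simp [h]

-- main invariant: A's loop state (acc, b) corresponds to B's group list gs
theorem pvMain (ls : List String) (acc : List String) (b : Int) (gs : List (Bool × List String))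
    (h1 : acc = pvOut gs) (h2 : (b ≠ 0) ↔ pvLastBlank gs = true) :
    (ls.foldl pvStepA (acc, b)).1 =
      pvOut (ls.foldl (fun gs l => pvStepB gs (PySem.Str.strip l)) gs) := by
  induction ls generalizing acc b gs with
  | nil => simpa using h1
  | cons l ls ih =>
    simp only [List.foldl_cons]
    by_cases hk : PySem.Str.strip l = ""
    · by_cases hb : b = 0
      · -- first blank of a run: A appends "" and sets b := 1; B starts a new blank group
        have hlastF : pvLastBlank gs = false := by
          cases h' : pvLastBlank gs
          · rfl
          · exact absurd (h2.mpr h') (by simp [hb])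
        have hstep : pvStepB gs (PySem.Str.strip l) = gs ++ [(true, [PySem.Str.strip l])] := by
          cases hgl : gs.getLast? with
          | none =>
            have hnil : gs = [] := List.getLast?_eq_none_iff.mp hgl
            subst hnil
            rw [pvStepB_new_empty, hk]
            simp
          | some kg =>
            have hkgF : kg.1 = false := by unfold pvLastBlank at hlastF; rw [hgl] at hlastF; exact hlastF
            rw [pvStepB_mismatch gs _ kg hgl (by simp [hkgF, hk]), hk]
            simp
        rw [pvStepA_blank_zero acc b l hk hb, hstep]
        apply ih
        · rw [pvOut_concat, h1, hk]; simp
        · rw [pvLastBlank_concat]; simp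
      · -- blank inside a blank run: A does nothing; B extends the last (blank) group
        have hlastT : pvLastBlank gs = true := h2.mp hb
        obtain ⟨kg, hgl, hkgT⟩ : ∃ kg, gs.getLast? = some kg ∧ kg.1 = true := by
          unfold pvLastBlank at hlastT
          cases hgl : gs.getLast? with
          | none => rw [hgl] at hlastT; simp at hlastT
          | some kg => exact ⟨kg, rfl, by rw [hgl] at hlastT; exact hlastT⟩
        have hstep := pvStepB_match gs (PySem.Str.strip l) kg hgl (by simp [hkgT, hk])
        rw [pvStepA_blank_pos acc b l hk hb, hstep]
        apply ih
        · rw [pvOut_concat, h1, pvOut_last gs kg hgl]; simp [hkgT]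
        · rw [pvLastBlank_concat]; simp [hkgT, hb]
    · -- non-blank line: A appends the stripped line and sets b := 0
      rw [pvStepA_nonblank acc b l hk]
      have hkf : (PySem.Str.strip l == "") = false := by simp [hk]
      cases hgl : gs.getLast? with
      | none =>
        have hnil : gs = [] := List.getLast?_eq_none_iff.mp hgl
        subst hnil
        have h1' : acc = [] := by simpa [pvOut] using h1
        subst h1'
        rw [pvStepB_new_empty, hkf]
        apply ih
        · simp [pvOut]
        · simp [pvLastBlank]
      | some kg =>
        cases hkg : kg.1 with
        | false =>
          -- extend the last (non-blank) group
          have hstep := pvStepB_match gs (PySem.Str.strip l) kg hgl (by simp [hkg, hkf])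
          rw [hstep]
          apply ih
          · rw [pvOut_concat, h1, pvOut_last gs kg hgl]; simp [hkg]
          · rw [pvLastBlank_concat]; simp [hkg]
        | true =>
          -- last group is blank: start a new non-blank group
          have hstep := pvStepB_mismatch gs (PySem.Str.strip l) kg hgl (by simp [hkg, hkf])
          rw [hstep, hkf]
          apply ih
          · rw [pvOut_concat, h1]; simp
          · rw [pvLastBlank_concat]; simp

-- ===== VERDICT (by name: the statement is the Claim_ definition above) =====
theorem remove_trailing_whitespace_py_spec : Claim_equal_remove_trailing_whitespace_py := by
  intro s _
  show remove_trailing_whitespace_py s = remove_trailing_whitespace_py_alt s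
  unfold remove_trailing_whitespace_py remove_trailing_whitespace_py_alt
  dsimp only
  rw [List.foldl_map, foldl_pvEmitB]
  simpa using pvMain (PySem.Str.splitlines (PySem.Str.strip s)) [] 0 [] rfl (by simp [pvLastBlank])
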